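-- pv_equiv track=rewrite | github.com/udangtangtang-uratchacha/algorithm-study | WEEK3/12904번 A와 B/c01d_br0th3r.py | go
-- ===== SOURCE A (Python) =====
-- def go(s, t):
--     while len(s) != len(t):
--         if t[-1] == 'A':
--             t = t[:-1]
--         else:
--             t = t[:-1]
--             t = t[::-1]
--     if s == t:
--         return 1
--     else:
--         return 0
-- ===== SOURCE B (Python) =====
-- def go(s, t):
--     # Two-pointer greedy: peel t from its ends with a direction flag instead of
--     # rebuilding/reversing the string each round.
--     lo, hi, rev = 0, len(t), False
--     for _ in range(len(t) - len(s)):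
--         if rev:
--             c = t[lo]
--             lo += 1
--         else:
--             hi -= 1
--             c = t[hi]
--         if c != 'A':
--             rev = not rev
--     seg = t[lo:hi]
--     if rev:
--         seg = seg[::-1]
--     return 1 if s == seg else 0
-- ===== Notes on version B (the rewrite author's own statement) =====
-- stated objective: faster
-- what changed: Instead of repeatedly copying t (slice to drop the last char, full reverse when it is not 'A'), B tracks the live window of t with two indices plus a direction flag and does one O(n) pass, comparing s to the final window once.
import Mathlib
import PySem

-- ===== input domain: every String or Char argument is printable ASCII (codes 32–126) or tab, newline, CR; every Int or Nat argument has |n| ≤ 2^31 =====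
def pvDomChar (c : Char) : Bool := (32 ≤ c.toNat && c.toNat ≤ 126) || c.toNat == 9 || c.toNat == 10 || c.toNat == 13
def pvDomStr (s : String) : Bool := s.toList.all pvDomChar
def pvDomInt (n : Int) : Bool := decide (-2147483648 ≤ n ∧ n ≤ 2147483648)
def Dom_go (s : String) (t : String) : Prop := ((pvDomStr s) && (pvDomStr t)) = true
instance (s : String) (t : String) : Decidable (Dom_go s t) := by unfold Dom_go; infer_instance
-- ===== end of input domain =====

-- B replaces A's repeated string slicing/reversing by a single two-pointer pass over t
-- with a direction flag (objective: faster, asymptotic).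


-- ===== PORT A =====
-- Literal port of A's while loop: pop t's last char (t[:-1]); if it was not 'A',
-- also reverse (t[::-1]); stop when the lengths agree, then compare.
-- u.getLast? = none corresponds to Python's t[-1] raising IndexError on the empty
-- string (reached exactly when len(s) > len(t); excluded by Pre_go); 0 there is a junk value.
def goA (s : List Char) (u : List Char) : Int :=
  if s.length = u.length then
    (if s = u then 1 else 0)
  else if hu : u = [] then 0
  else if u.getLast hu = 'A' then goA s u.dropLast
  else goA s u.dropLast.reverse
termination_by u.length
decreasing_by
  all_goals
    simp [List.length_dropLast]
    exact List.length_pos_iff.mpr hu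

def go (s : String) (t : String) : Int := goA s.toList t.toList

-- ===== PORT B =====
-- One loop iteration of Source B: read the current "last" char of the live window
-- t[lo:hi] (oriented by rev), shrink the window, flip rev if the char is not 'A'.
-- The index is always in range when the loop runs, so getD's default is never used.
def stepB (t : List Char) (st : Nat × Nat × Bool) : Nat × Nat × Bool :=
  if st.2.2 then
    (st.1 + 1, st.2.1, if t[st.1]?.getD ' ' ≠ 'A' then !st.2.2 else st.2.2)
  else
    (st.1, st.2.1 - 1, if t[st.2.1 - 1]?.getD ' ' ≠ 'A' then !st.2.2 else st.2.2)

-- t[lo:hi] for 0 ≤ lo ≤ hi ≤ len t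
def segOf (t : List Char) (lo hi : Nat) : List Char := (t.drop lo).take (hi - lo)

-- the current string: the window, reversed when the flag is set
def reprOf (t : List Char) (st : Nat × Nat × Bool) : List Char :=
  if st.2.2 then (segOf t st.1 st.2.1).reverse else segOf t st.1 st.2.1

def go_alt (s : String) (t : String) : Int :=
  if s.toList = reprOf t.toList
      ((List.range (t.toList.length - s.toList.length)).foldl
        (fun st _ => stepB t.toList st) (0, t.toList.length, false)) then 1 else 0

-- ===== PRECONDITION & SPEC =====
-- Pre_go excludes exactly the inputs where Python A raises: when len(s) > len(t),
-- A shrinks t to "" and t[-1] raises IndexError.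
def Pre_go (s : String) (t : String) : Prop := s.toList.length ≤ t.toList.length
instance (s : String) (t : String) : Decidable (Pre_go s t) := by unfold Pre_go; infer_instance
def pvWitness_go : String × String := ("AB", "BABA")

def Spec_go (s : String) (t : String) (out : Int) : Prop := out = go_alt s t
instance (s : String) (t : String) (out : Int) : Decidable (Spec_go s t out) := by unfold Spec_go; infer_instance

-- ===== CLAIM =====
def Claim_equal_go : Prop := ∀ (s : String) (t : String), Dom_go s t → Pre_go s t → Spec_go s t (go s t)

-- ===== LEMMAS AND PROOFS =====

lemma foldl_range_const {α : Type} (f : α → α) (init : α) (k : Nat) :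
    (List.range k).foldl (fun a _ => f a) init = f^[k] init := by
  induction k with
  | zero => simp
  | succ n ih =>
    rw [List.range_succ, List.foldl_append, ih, Function.iterate_succ_apply']
    simp

lemma segOf_cons (t : List Char) (lo hi : Nat) (h1 : lo < hi) (h2 : hi ≤ t.length) :
    segOf t lo hi = t[lo]?.getD ' ' :: segOf t (lo + 1) hi := by
  have hlo : lo < t.length := lt_of_lt_of_le h1 h2
  unfold segOf
  rw [List.drop_eq_getElem_cons hlo]
  have hm : hi - lo = (hi - (lo + 1)) + 1 := by omega
  rw [hm, List.take_succ_cons]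
  simp [List.getElem?_eq_getElem hlo]

lemma segOf_snoc (t : List Char) (lo hi : Nat) (h1 : lo < hi) (h2 : hi ≤ t.length) :
    segOf t lo hi = segOf t lo (hi - 1) ++ [t[hi - 1]?.getD ' '] := by
  have hhi : hi - 1 < t.length := by omega
  unfold segOf
  have hm : hi - lo = (hi - 1 - lo) + 1 := by omega
  rw [hm, List.take_add_one]
  have hidx : (t.drop lo)[hi - 1 - lo]? = some (t[hi - 1]?.getD ' ') := by
    rw [List.getElem?_drop]
    have : lo + (hi - 1 - lo) = hi - 1 := by omega
    simp [this, List.getElem?_eq_getElem hhi]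
  rw [hidx]
  rfl

lemma segOf_length (t : List Char) (lo hi : Nat) (_h1 : lo ≤ hi) (h2 : hi ≤ t.length) :
    (segOf t lo hi).length = hi - lo := by
  unfold segOf
  simp [List.length_take, List.length_drop]
  omega

lemma reprOf_length (t : List Char) (st : Nat × Nat × Bool) (h1 : st.1 ≤ st.2.1)
    (h2 : st.2.1 ≤ t.length) : (reprOf t st).length = st.2.1 - st.1 := by
  unfold reprOf
  split <;> simp [segOf_length t st.1 st.2.1 h1 h2]

lemma keyA (k : Nat) : ∀ (t s : List Char) (st : Nat × Nat × Bool),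
    st.2.1 ≤ t.length → st.1 + s.length + k = st.2.1 →
    goA s (reprOf t st) = (if s = reprOf t ((stepB t)^[k] st) then 1 else 0) := by
  induction k with
  | zero =>
    intro t s st h2 hk
    have h1 : st.1 ≤ st.2.1 := by omega
    rw [Function.iterate_zero_apply, goA]
    have hlen : s.length = (reprOf t st).length := by
      rw [reprOf_length t st h1 h2]; omega
    simp [hlen]
  | succ n ih =>
    intro t s st h2 hk
    obtain ⟨lo, hi, rev⟩ := st
    simp only at h2 hk ⊢
    have h1 : lo < hi := by omega
    rw [Function.iterate_succ_apply, goA]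
    have hlen : s.length ≠ (reprOf t (lo, hi, rev)).length := by
      rw [reprOf_length t (lo, hi, rev) (le_of_lt h1) h2]; simp; omega
    rw [if_neg hlen]
    cases rev with
    | false =>
      have hsnoc := segOf_snoc t lo hi h1 h2
      have hrep : reprOf t (lo, hi, false) = segOf t lo (hi - 1) ++ [t[hi - 1]?.getD ' '] := by
        simpa [reprOf] using hsnoc
      have hlast : (reprOf t (lo, hi, false)).getLast? = some (t[hi - 1]?.getD ' ') := by
        rw [hrep, List.getLast?_concat]
      have hdl : (reprOf t (lo, hi, false)).dropLast = segOf t lo (hi - 1) := by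
        rw [hrep, List.dropLast_concat]
      have hne : reprOf t (lo, hi, false) ≠ [] := by rw [hrep]; simp
      rw [dif_neg hne]
      have hlv : (reprOf t (lo, hi, false)).getLast hne = t[hi - 1]?.getD ' ' := by
        have h' := List.getLast?_eq_some_getLast (l := reprOf t (lo, hi, false)) hne
        exact Option.some.inj (h'.symm.trans hlast)
      rw [hlv]
      by_cases hc : t[hi - 1]?.getD ' ' = 'A'
      · have hst : stepB t (lo, hi, false) = (lo, hi - 1, false) := by simp [stepB, hc]
        rw [if_pos hc, hdl, hst]
        have := ih t s (lo, hi - 1, false) (by simp; omega) (by simp; omega)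
        simpa [reprOf] using this
      · have hst : stepB t (lo, hi, false) = (lo, hi - 1, true) := by simp [stepB, hc]
        rw [if_neg hc, hdl, hst]
        have := ih t s (lo, hi - 1, true) (by simp; omega) (by simp; omega)
        simpa [reprOf] using this
    | true =>
      have hcons := segOf_cons t lo hi h1 h2
      have hrep : reprOf t (lo, hi, true) = (segOf t (lo + 1) hi).reverse ++ [t[lo]?.getD ' '] := by
        simp only [reprOf, if_pos]
        rw [hcons]; simp
      have hlast : (reprOf t (lo, hi, true)).getLast? = some (t[lo]?.getD ' ') := by
        rw [hrep, List.getLast?_concat]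
      have hdl : (reprOf t (lo, hi, true)).dropLast = (segOf t (lo + 1) hi).reverse := by
        rw [hrep, List.dropLast_concat]
      have hne : reprOf t (lo, hi, true) ≠ [] := by rw [hrep]; simp
      rw [dif_neg hne]
      have hlv : (reprOf t (lo, hi, true)).getLast hne = t[lo]?.getD ' ' := by
        have h' := List.getLast?_eq_some_getLast (l := reprOf t (lo, hi, true)) hne
        exact Option.some.inj (h'.symm.trans hlast)
      rw [hlv]
      by_cases hc : t[lo]?.getD ' ' = 'A'
      · have hst : stepB t (lo, hi, true) = (lo + 1, hi, true) := by simp [stepB, hc]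
        rw [if_pos hc, hdl, hst]
        have := ih t s (lo + 1, hi, true) (by simpa using h2) (by simp; omega)
        simpa [reprOf] using this
      · have hst : stepB t (lo, hi, true) = (lo + 1, hi, false) := by simp [stepB, hc]
        rw [if_neg hc, hdl, List.reverse_reverse, hst]
        have := ih t s (lo + 1, hi, false) (by simpa using h2) (by simp; omega)
        simpa [reprOf] using this

-- ===== VERDICT =====
theorem go_spec : Claim_equal_go := by
  intro s t _ hpre
  unfold Spec_go go go_alt
  rw [foldl_range_const]
  have h0 : (0 : Nat) + s.toList.length + (t.toList.length - s.toList.length) = t.toList.length := by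
    unfold Pre_go at hpre; omega
  have := keyA (t.toList.length - s.toList.length) t.toList s.toList (0, t.toList.length, false)
    (le_refl _) h0
  rw [← this]
  have : reprOf t.toList (0, t.toList.length, false) = t.toList := by
    simp [reprOf, segOf]
  rw [this]
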